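-- pv_equiv track=rewrite | github.com/snow-QingYang/El-Agente-Math | src/formula_extractor.py | _remove_sub_supers
-- ===== SOURCE A (Python) =====
-- from typing import Any, Dict, Iterable, List, Optional, Tuple
--
-- def _remove_sub_supers(expr: str) -> str:
--     result: list[str] = []
--     i = 0
--     length = len(expr)
--     while i < length:
--         ch = expr[i]
--         if ch in ("_", "^"):
--             i += 1
--             if i < length and expr[i] == "{":
--                 closing = _find_matching_brace(expr, i)
--                 if closing is None:
--                     break
--                 i = closing + 1
--             else:
--                 i += 1
--             continue
--         result.append(ch)
--         i += 1
--     return "".join(result)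
--
-- def _find_matching_brace(expr: str, start: int) -> Optional[int]:
--     if start >= len(expr) or expr[start] != "{":
--         return None
--
--     depth = 0
--     for idx in range(start, len(expr)):
--         ch = expr[idx]
--         if ch == "{":
--             depth += 1
--         elif ch == "}":
--             depth -= 1
--             if depth == 0:
--                 return idx
--             if depth < 0:
--                 return None
--     return None
-- ===== SOURCE B (Python) =====
-- def _remove_sub_supers(expr: str) -> str:
--     out = []
--     pending = False  # True right after an unprocessed '_' or '^'
--     depth = 0        # > 0 while dropping a brace group
--     for ch in expr:
--         if depth > 0:
--             if ch == "{":
--                 depth += 1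
--             elif ch == "}":
--                 depth -= 1
--         elif pending:
--             pending = False
--             if ch == "{":
--                 depth = 1
--             # otherwise the single following character is dropped
--         elif ch in ("_", "^"):
--             pending = True
--         else:
--             out.append(ch)
--     return "".join(out)
-- ===== Notes on version B (the rewrite author's own statement) =====
-- stated objective: simpler
-- what changed: Replaced A's index-based scan that calls a separate brace-matching helper with a single character-by-character pass maintaining a pending-marker flag and an explicit drop depth.
import Mathlib
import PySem

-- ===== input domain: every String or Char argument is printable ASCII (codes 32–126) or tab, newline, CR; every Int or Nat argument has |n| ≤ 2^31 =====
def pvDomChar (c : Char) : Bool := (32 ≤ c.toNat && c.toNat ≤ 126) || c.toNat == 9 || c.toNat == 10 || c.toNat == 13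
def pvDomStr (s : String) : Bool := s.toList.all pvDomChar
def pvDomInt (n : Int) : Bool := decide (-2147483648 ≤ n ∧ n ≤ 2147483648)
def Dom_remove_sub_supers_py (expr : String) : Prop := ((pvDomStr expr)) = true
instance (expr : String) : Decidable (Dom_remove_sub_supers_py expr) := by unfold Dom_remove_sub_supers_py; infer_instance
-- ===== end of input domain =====

-- B replaces A's index scan with a separate brace-matching helper by a single pass carrying
-- a pending-marker flag and a drop depth (objective: simpler; same linear cost).

-- ===== PORT A =====
-- _find_matching_brace's scan, at list level: the caller's 'i = closing + 1' is represented
-- by returning the suffix AFTER the matching '}' (the same information as the index).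
def pvScanA : List Char → Int → Option (List Char)
  | [], _ => none
  | c :: rest, depth =>
    if c = '{' then pvScanA rest (depth + 1)
    else if c = '}' then
      (if depth - 1 = 0 then some rest
       else if depth - 1 < 0 then none
       else pvScanA rest (depth - 1))
    else pvScanA rest depth
def pvFindA (cs : List Char) : Option (List Char) :=
  match cs with
  | '{' :: _ => pvScanA cs 0
  | _ => none
theorem pvScanA_length : ∀ (cs : List Char) (d : Int) (suf : List Char),
    pvScanA cs d = some suf → suf.length < cs.length := by
  intro cs
  induction cs with
  | nil => intro d suf h; simp [pvScanA] at h
  | cons c rest ih =>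
    intro d suf h
    simp only [pvScanA] at h
    split_ifs at h <;>
      first
        | exact Nat.lt_succ_of_lt (ih _ _ h)
        | (injection h with h; subst h; simp)
        | simp at h
theorem pvFindA_length (cs : List Char) (suf : List Char)
    (h : pvFindA cs = some suf) : suf.length < cs.length := by
  unfold pvFindA at h
  split at h
  · exact pvScanA_length _ _ _ h
  · cases h
-- A's main while loop over the remaining characters
def pvLoopA : List Char → List Char
  | [] => []
  | ch :: rest =>
    if ch = '_' ∨ ch = '^' then
      match rest with
      | [] => []
      | c :: rest' =>
        if c = '{' then
          match h : pvFindA (c :: rest') with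
          | none => []
          | some suf => pvLoopA suf
        else pvLoopA rest'
    else ch :: pvLoopA rest
  termination_by cs => cs.length
  decreasing_by
  · have := pvFindA_length _ _ h
    simp at this ⊢
    omega
  · simp
  · simp
def remove_sub_supers_py (expr : String) : String :=
  String.ofList (pvLoopA expr.toList)

-- ===== PORT B =====
-- one pass: depth > 0 = currently dropping a brace group; pending = just saw an unprocessed '_'/'^'
def pvLoopB : List Char → Bool → Nat → List Char
  | [], _, _ => []
  | ch :: rest, pending, depth =>
    if depth > 0 then
      if ch = '{' then pvLoopB rest pending (depth + 1)
      else if ch = '}' then pvLoopB rest pending (depth - 1)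
      else pvLoopB rest pending depth
    else if pending then
      (if ch = '{' then pvLoopB rest false 1
       else pvLoopB rest false 0)
    else if ch = '_' ∨ ch = '^' then
      pvLoopB rest true 0
    else ch :: pvLoopB rest false 0

def remove_sub_supers_py_alt (expr : String) : String :=
  String.ofList (pvLoopB expr.toList false 0)

-- ===== PRECONDITION & SPEC =====
def Spec_remove_sub_supers_py (expr : String) (out : String) : Prop := out = remove_sub_supers_py_alt expr
instance (expr : String) (out : String) : Decidable (Spec_remove_sub_supers_py expr out) := by unfold Spec_remove_sub_supers_py; infer_instance

-- ===== CLAIM (what is proved, stated in full; the proofs are below) =====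
def Claim_equal_remove_sub_supers_py : Prop := ∀ (expr : String), Dom_remove_sub_supers_py expr → Spec_remove_sub_supers_py expr (remove_sub_supers_py expr)

-- ===== LEMMAS AND PROOFS =====

-- While B drops at depth n+1 it emits nothing and computes exactly what A's brace scan
-- decides: on the matching '}' both continue on the same suffix; an unmatched brace
-- drops the rest of the input.
theorem pvLoopB_drop : ∀ (cs : List Char) (n : Nat),
    pvLoopB cs false (n + 1) =
      (match pvScanA cs ((n : Int) + 1) with
       | none => []
       | some suf => pvLoopB suf false 0) := by
  intro cs
  induction cs with
  | nil => intro n; simp [pvLoopB, pvScanA]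
  | cons c rest ih =>
    intro n
    by_cases hb : c = '{'
    · subst hb
      simp only [pvLoopB, pvScanA, if_pos (by omega : (0:Nat) < n + 1), if_pos rfl]
      have := ih (n + 1)
      push_cast at this
      rw [show (n : Int) + 1 + 1 = (n + 1 : Int) + 1 by ring]
      simpa using this
    · by_cases hc : c = '}'
      · subst hc
        rcases n with _ | m
        · simp [pvLoopB, pvScanA]
        · simp only [pvLoopB, pvScanA, if_pos (by omega : (0:Nat) < m + 1 + 1),
            if_neg (by decide : ¬ ('}' : Char) = '{'), if_pos rfl]
          have h1 : ¬ ((m + 1 : Nat) : Int) + 1 - 1 = 0 := by push_cast; omega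
          have h2 : ¬ ((m + 1 : Nat) : Int) + 1 - 1 < 0 := by push_cast; omega
          rw [if_neg h1, if_neg h2]
          have := ih m
          rw [show ((m + 1 : Nat) : Int) + 1 - 1 = (m : Int) + 1 by push_cast; ring]
          simpa using this
      · simp only [pvLoopB, pvScanA, if_pos (by omega : (0:Nat) < n + 1), if_neg hb, if_neg hc]
        exact ih n

theorem loopA_eq_loopB : ∀ (cs : List Char), pvLoopA cs = pvLoopB cs false 0 := by
  intro cs
  fun_induction pvLoopA cs with
  | case1 => simp [pvLoopB]
  | case2 ch hm => simp [pvLoopB, hm]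
  | case3 ch hm rest' hfind =>
    simp only [pvLoopB, if_neg (by omega : ¬ (0:Nat) > 0), if_neg Bool.false_ne_true, if_pos hm]
    rw [show (1:Nat) = 0 + 1 from rfl, pvLoopB_drop rest' 0]
    unfold pvFindA at hfind
    simp [pvScanA] at hfind ⊢
    rw [hfind]
  | case4 ch hm rest' suf hfind ih =>
    simp only [pvLoopB, if_neg (by omega : ¬ (0:Nat) > 0), if_neg Bool.false_ne_true, if_pos hm]
    rw [show (1:Nat) = 0 + 1 from rfl, pvLoopB_drop rest' 0]
    unfold pvFindA at hfind
    simp [pvScanA] at hfind ⊢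
    rw [hfind]
    exact ih
  | case5 ch hm c rest' hb ih =>
    simp [pvLoopB, hm, hb, ih]
  | case6 ch rest hm ih =>
    simp [pvLoopB, hm, ih]

-- ===== VERDICT (by name: the statement is the Claim_ definition above) =====
theorem remove_sub_supers_py_spec : Claim_equal_remove_sub_supers_py := by
  intro expr _
  unfold Spec_remove_sub_supers_py remove_sub_supers_py remove_sub_supers_py_alt
  rw [loopA_eq_loopB]
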